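-- pv_equiv track=rewrite | github.com/mireu-san/lab-2023-others | programmers/lv1/lv1_zip_review.py | solution
-- ===== SOURCE A (Python) =====
-- def solution(absolutes, signs):
--     result = 0
--
--     # enumerate 와 유사하게, zip 을 사용하면 두 개의 리스트를 하나로 묶어준다.
--     for num, sign in zip(absolutes, signs):
--         # sign 이 True 이면 num 을 더하고, False 이면 num 을 뺀다.
--         if sign == True:
--             result += num
--
--         else:
--             result -= num
--
--     return result
-- ===== SOURCE B (Python) =====
-- def solution(absolutes, signs):
--     total = sum(num for num, sign in zip(absolutes, signs))
--     neg = sum(num for num, sign in zip(absolutes, signs) if sign != True)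
--     return total - 2 * neg
-- ===== Notes on version B (the rewrite author's own statement) =====
-- stated objective: alternative
-- what changed: Replaces the single fused add/subtract loop by two summation passes (total of all zipped nums, and sum of negatively-signed nums) combined by the identity total - 2*neg.
import Mathlib
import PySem

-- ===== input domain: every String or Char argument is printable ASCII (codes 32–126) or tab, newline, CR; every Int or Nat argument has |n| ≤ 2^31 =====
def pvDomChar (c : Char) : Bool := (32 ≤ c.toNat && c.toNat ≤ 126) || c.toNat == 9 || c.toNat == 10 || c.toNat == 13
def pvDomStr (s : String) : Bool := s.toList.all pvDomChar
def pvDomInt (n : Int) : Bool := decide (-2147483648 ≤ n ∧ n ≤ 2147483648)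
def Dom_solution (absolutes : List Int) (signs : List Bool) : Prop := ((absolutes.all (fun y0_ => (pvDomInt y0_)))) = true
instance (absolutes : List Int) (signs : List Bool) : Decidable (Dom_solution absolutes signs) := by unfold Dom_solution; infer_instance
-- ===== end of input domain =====

-- B replaces A's fused add/subtract loop by two summation passes combined as total - 2*neg (alternative decomposition, same cost).

-- ===== PORT A =====
-- single loop over zip, adding when sign == True, subtracting otherwise
def solution (absolutes : List Int) (signs : List Bool) : Int :=
  (absolutes.zip signs).foldl (fun result p => if p.2 == true then result + p.1 else result - p.1) 0

-- ===== PORT B =====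
-- two passes: total of all zipped nums, and sum of negatively-signed nums; result = total - 2*neg
def solution_alt (absolutes : List Int) (signs : List Bool) : Int :=
  let total := ((absolutes.zip signs).map (fun p => p.1)).sum
  let neg := (((absolutes.zip signs).filter (fun p => p.2 != true)).map (fun p => p.1)).sum
  total - 2 * neg

-- ===== PRECONDITION & SPEC =====
def Spec_solution (absolutes : List Int) (signs : List Bool) (out : Int) : Prop := out = solution_alt absolutes signs
instance (absolutes : List Int) (signs : List Bool) (out : Int) : Decidable (Spec_solution absolutes signs out) := by unfold Spec_solution; infer_instance

-- ===== CLAIM (what is proved, stated in full; the proofs are below) =====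
def Claim_equal_solution : Prop := ∀ (absolutes : List Int) (signs : List Bool), Dom_solution absolutes signs → Spec_solution absolutes signs (solution absolutes signs)

-- ===== LEMMAS AND PROOFS =====
theorem solution_foldl_key (l : List (Int × Bool)) (acc : Int) :
    l.foldl (fun result p => if p.2 == true then result + p.1 else result - p.1) acc
      = acc + (l.map (fun p => p.1)).sum
            - 2 * ((l.filter (fun p => p.2 != true)).map (fun p => p.1)).sum := by
  induction l generalizing acc with
  | nil => simp
  | cons hd tl ih =>
      obtain ⟨n, b⟩ := hd
      rw [List.foldl_cons, ih]
      cases b <;> simp <;> ring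

-- ===== VERDICT (by name: the statement is the Claim_ definition above) =====
theorem solution_spec : Claim_equal_solution := by
  intro a s _
  unfold Spec_solution solution solution_alt
  rw [solution_foldl_key]
  ring
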